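-- pv_equiv track=rewrite | github.com/mohamedhozayen/Handover-Starlink-Simulation | eqn.py | count_handovers
-- ===== SOURCE A (Python) =====
-- def count_handovers(sln):
--     #count handovers
--     handover_counter = 0
--     for i in range(1, len(sln)):
--         s, t = sln[i].split('-')
--         sp, tp = sln[i-1].split('-')
--         if sp != s:
--             handover_counter = handover_counter + 1
--     return handover_counter
-- ===== SOURCE B (Python) =====
-- def count_handovers(sln):
--     if len(sln) < 2:
--         return 0
--     # collapse consecutive runs of the leading field, then count = number of runs - 1
--     runs = []
--     for x in sln:
--         s, _t = x.split('-')
--         if not runs or runs[-1] != s: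
--             runs.append(s)
--     return len(runs) - 1
-- ===== Notes on version B (the rewrite author's own statement) =====
-- stated objective: alternative
-- what changed: B run-length-collapses the sequence of leading fields into a list of consecutive runs and returns len(runs)-1, instead of counting differing adjacent pairs with an indexed loop that re-splits both neighbours.
import Mathlib
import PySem

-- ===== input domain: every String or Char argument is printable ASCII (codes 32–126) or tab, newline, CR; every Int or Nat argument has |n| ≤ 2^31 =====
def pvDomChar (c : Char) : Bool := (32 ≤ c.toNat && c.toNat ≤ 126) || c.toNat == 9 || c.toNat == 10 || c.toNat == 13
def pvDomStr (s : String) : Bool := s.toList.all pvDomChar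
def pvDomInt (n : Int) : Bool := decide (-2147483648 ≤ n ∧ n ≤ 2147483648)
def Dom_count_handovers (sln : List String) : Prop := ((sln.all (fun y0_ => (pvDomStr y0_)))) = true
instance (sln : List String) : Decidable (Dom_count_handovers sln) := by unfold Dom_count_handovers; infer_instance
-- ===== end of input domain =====

-- B uses a different algorithm: it run-length-collapses the leading fields into a run list and
-- returns len(runs)-1, instead of A's indexed loop counting differing adjacent pairs.

-- ===== PORT A =====
-- loop body of A: s,t = sln[i].split('-'); sp,tp = sln[i-1].split('-'); if sp != s: counter += 1
-- (the two-target unpack raises unless the split has exactly two pieces; the port leaves the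
--  accumulator unchanged on those none/other-shape branches, and Pre_ excludes exactly them)
def pvBodyA (sln : List String) (hc : Int) (i : Int) : Int :=
  match PySem.List.pyGet? sln i, PySem.List.pyGet? sln (i - 1) with
  | some cur, some prev =>
    match PySem.Str.split? cur "-", PySem.Str.split? prev "-" with
    | some [s, _t], some [sp, _tp] => if sp ≠ s then hc + 1 else hc
    | _, _ => hc
  | _, _ => hc

def count_handovers (sln : List String) : Int :=
  (PySem.List.pyRange 1 (sln.length : Int) 1).foldl (pvBodyA sln) 0

-- ===== PORT B =====
-- B's loop body: s,_t = x.split('-'); if not runs or runs[-1] != s: runs.append(s)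
-- (the non-[s,t] split shapes are B's ValueError cases, excluded by Pre_; the port leaves runs
--  unchanged there)
def pvRunStep (runs : List String) (x : String) : List String :=
  match PySem.Str.split? x "-" with
  | some [s, _t] =>
      if runs = [] ∨ PySem.List.pyGet? runs (-1) ≠ some s then runs ++ [s] else runs
  | _ => runs

def count_handovers_alt (sln : List String) : Int :=
  if sln.length < 2 then 0
  else ((sln.foldl pvRunStep []).length : Int) - 1

-- ===== PRECONDITION & SPEC =====
-- Pre_ excludes exactly the inputs where the Python A raises ValueError: a list of length ≥ 2
-- containing a label whose split('-') does not have exactly two pieces (A splits nothing when len < 2).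
def Pre_count_handovers (sln : List String) : Prop :=
  sln.length < 2 ∨ ∀ x ∈ sln, ((PySem.Str.split? x "-").getD []).length = 2
instance (sln : List String) : Decidable (Pre_count_handovers sln) := by
  unfold Pre_count_handovers; infer_instance
def pvWitness_count_handovers : List String := ["1-a", "2-b", "2-c"]

def Spec_count_handovers (sln : List String) (out : Int) : Prop := out = count_handovers_alt sln
instance (sln : List String) (out : Int) : Decidable (Spec_count_handovers sln out) := by
  unfold Spec_count_handovers; infer_instance

-- ===== CLAIM (what is proved, stated in full; the proofs are below) =====
def Claim_equal_count_handovers : Prop := ∀ (sln : List String), Dom_count_handovers sln → Pre_count_handovers sln → Spec_count_handovers sln (count_handovers sln)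

-- ===== LEMMAS AND PROOFS =====

-- the leading field of a well-formed label
def pvFirstField (x : String) : String :=
  match PySem.Str.split? x "-" with
  | some [s, _t] => s
  | _ => ""

-- the comparison A makes for one adjacent pair (prev = sln[i-1], cur = sln[i])
def pvPairStep (prev cur : String) (hc : Int) : Int :=
  match PySem.Str.split? cur "-", PySem.Str.split? prev "-" with
  | some [s, _t], some [sp, _tp] => if sp ≠ s then hc + 1 else hc
  | _, _ => hc

-- number of adjacent changes in a :: l
def pvCnt (a : String) (l : List String) : Nat :=
  match l with
  | [] => 0
  | b :: t => (if a = b then 0 else 1) + pvCnt b t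

-- B's run step once the split shape is known: a pure step on the leading field
def pvPStep (runs : List String) (s : String) : List String :=
  if runs = [] ∨ PySem.List.pyGet? runs (-1) ≠ some s then runs ++ [s] else runs

-- A's loop reads only the pair (sln[i-1], sln[i]); over range(1, len) that is a fold over the
-- adjacent-pair list.
theorem pvFoldPairs : ∀ (l : List String) (acc : Int),
    (PySem.List.pyRange 1 (l.length : Int) 1).foldl (pvBodyA l) acc
      = (l.zip l.tail).foldl (fun hc p => pvPairStep p.1 p.2 hc) acc := by
  intro l
  induction l with
  | nil => intro acc; rw [PySem.List.pyRange_one_eq_nil (by simp)]; simp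
  | cons x xs ih =>
    intro acc
    cases xs with
    | nil => rw [PySem.List.pyRange_one_eq_nil (by simp)]; simp
    | cons y t =>
      have hL : (((x :: y :: t).length : Nat) : Int) = (t.length : Int) + 2 := by
        push_cast [List.length_cons]; ring
      rw [hL, PySem.List.pyRange_one_cons (by omega : (1 : Int) < (t.length : Int) + 2)]
      simp only [List.foldl_cons]
      have e0 : pvBodyA (x :: y :: t) acc 1 = pvPairStep x y acc := by
        simp only [pvBodyA]
        have g1 : PySem.List.pyGet? (x :: y :: t) 1 = some y := by
          rw [(by norm_num : (1 : Int) = ((1 : Nat) : Int)), PySem.List.pyGet?_natCast]; rfl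
        have g0 : PySem.List.pyGet? (x :: y :: t) (1 - 1) = some x := by
          norm_num [PySem.List.pyGet?_zero_cons]
        rw [g1, g0]
        rfl
      rw [e0]
      have key : ∀ a : Int,
          (PySem.List.pyRange (1 + 1) ((t.length : Int) + 2) 1).foldl (pvBodyA (x :: y :: t)) a
            = (PySem.List.pyRange 1 ((t.length : Int) + 1) 1).foldl (pvBodyA (y :: t)) a := by
        intro a
        rw [PySem.List.pyRange_one, PySem.List.pyRange_one]
        have h2 : ((t.length : Int) + 2 - (1 + 1)).toNat = t.length := by omega
        have h1 : ((t.length : Int) + 1 - 1).toNat = t.length := by omega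
        rw [h2, h1, List.foldl_map, List.foldl_map]
        apply PySem.List.foldl_congr_mem
        intro a2 k _
        simp only [pvBodyA]
        have ga : PySem.List.pyGet? (x :: y :: t) (1 + 1 + (k : Int)) = t[k]? := by
          rw [(by push_cast; ring : (1 + 1 + (k : Int)) = ((k + 2 : Nat) : Int)),
            PySem.List.pyGet?_natCast]; simp
        have gb : PySem.List.pyGet? (x :: y :: t) (1 + 1 + (k : Int) - 1) = (y :: t)[k]? := by
          rw [(by push_cast; ring : (1 + 1 + (k : Int) - 1) = ((k + 1 : Nat) : Int)),
            PySem.List.pyGet?_natCast]; simp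
        have gc : PySem.List.pyGet? (y :: t) (1 + (k : Int)) = t[k]? := by
          rw [(by push_cast; ring : (1 + (k : Int)) = ((k + 1 : Nat) : Int)),
            PySem.List.pyGet?_natCast]; simp
        have gd : PySem.List.pyGet? (y :: t) (1 + (k : Int) - 1) = (y :: t)[k]? := by
          rw [(by omega : (1 + (k : Int) - 1) = ((k : Nat) : Int)),
            PySem.List.pyGet?_natCast]
        rw [ga, gb, gc, gd]
      rw [key]
      have hL' : (((y :: t).length : Nat) : Int) = (t.length : Int) + 1 := by
        push_cast [List.length_cons]; ring
      rw [← hL', ih]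
      simp only [List.tail_cons, List.zip_cons_cons, List.foldl_cons]

theorem pvLen2 (l : List String) (h : l.length = 2) : ∃ a b, l = [a, b] := by
  match l, h with
  | [a, b], _ => exact ⟨a, b, rfl⟩

theorem pvFoldlCongr {α β : Type} (l : List β) (f g : α → β → α) (init : α)
    (h : ∀ a b, b ∈ l → f a b = g a b) : l.foldl f init = l.foldl g init := by
  induction l generalizing init with
  | nil => rfl
  | cons x t ih =>
    simp only [List.foldl_cons]
    rw [h init x (by simp)]
    exact ih (g init x) (fun a b hb => h a b (List.mem_cons_of_mem _ hb))

-- A side: the adjacent-pair counting fold computes pvCnt on the leading fields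
theorem pvZipCnt (f : String → String) :
    ∀ (l : List String) (x : String) (acc : Int),
      ((x :: l).zip l).foldl (fun hc p => if f p.1 ≠ f p.2 then hc + 1 else hc) acc
        = acc + (pvCnt (f x) (l.map f) : Int) := by
  intro l
  induction l with
  | nil => intro x acc; simp [pvCnt]
  | cons b t ih =>
    intro x acc
    simp only [List.zip_cons_cons, List.foldl_cons, List.map_cons, pvCnt]
    by_cases h : f x = f b
    · rw [if_neg (by simpa using h), ih b acc, if_pos h]
      push_cast; ring
    · rw [if_pos (by simpa using h), ih b (acc + 1), if_neg h]
      push_cast; ring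

-- B side: the run fold's length, tracked by the current last run element
theorem pvRunLen :
    ∀ (l : List String) (runs : List String) (a : String),
      runs.getLast? = some a →
      (l.foldl pvPStep runs).length = runs.length + pvCnt a l := by
  intro l
  induction l with
  | nil => intro runs a _; simp [pvCnt]
  | cons b t ih =>
    intro runs a hlast
    have hne : runs ≠ [] := by intro h; rw [h] at hlast; simp at hlast
    have hget : PySem.List.pyGet? runs (-1) = some a := by
      rw [PySem.List.pyGet?_neg_one, hlast]
    simp only [List.foldl_cons, pvCnt]
    by_cases h : a = b
    · have : pvPStep runs b = runs := by
        simp [pvPStep, hne, hget, h]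
      rw [this, ih runs a hlast, if_pos h, h]
      omega
    · have hstep : pvPStep runs b = runs ++ [b] := by
        simp only [pvPStep, hget]
        rw [if_pos (Or.inr (by simp [h]))]
      rw [hstep, ih (runs ++ [b]) b (by simp)]
      simp [h]
      omega

theorem count_handovers_spec : Claim_equal_count_handovers := by
  intro sln _ hpre
  unfold Spec_count_handovers count_handovers count_handovers_alt
  by_cases hlen : sln.length < 2
  · rw [if_pos hlen, PySem.List.pyRange_one_eq_nil (by omega)]
    simp
  · rw [if_neg hlen]
    have hall : ∀ x ∈ sln, ((PySem.Str.split? x "-").getD []).length = 2 :=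
      hpre.resolve_left hlen
    have hsplit : ∀ x ∈ sln, ∃ t2, PySem.Str.split? x "-" = some [pvFirstField x, t2] := by
      intro x hx
      have hx2 := hall x hx
      cases hs : PySem.Str.split? x "-" with
      | none => rw [hs] at hx2; simp at hx2
      | some l =>
        rw [hs] at hx2; simp at hx2
        obtain ⟨a, b, rfl⟩ := pvLen2 l hx2
        exact ⟨b, by simp [pvFirstField, hs]⟩
    obtain ⟨x, rest, rfl⟩ : ∃ x rest, sln = x :: rest := by
      cases sln with
      | nil => simp at hlen
      | cons x rest => exact ⟨x, rest, rfl⟩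
    -- A side
    rw [pvFoldPairs]
    rw [pvFoldlCongr ((x :: rest).zip (x :: rest).tail)
        (fun hc p => pvPairStep p.1 p.2 hc)
        (fun hc p => if pvFirstField p.1 ≠ pvFirstField p.2 then hc + 1 else hc) 0
        (by
          intro hc p hp
          obtain ⟨h1, h2⟩ := List.of_mem_zip hp
          rw [List.tail_cons] at h2
          obtain ⟨t1, e1⟩ := hsplit p.1 h1
          obtain ⟨t2, e2⟩ := hsplit p.2 (List.mem_cons_of_mem _ h2)
          simp only [pvPairStep, e1, e2])]
    rw [List.tail_cons, pvZipCnt pvFirstField rest x 0]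
    -- B side
    rw [pvFoldlCongr (x :: rest) pvRunStep (fun r y => pvPStep r (pvFirstField y)) []
        (by
          intro r y hy
          obtain ⟨t2, e2⟩ := hsplit y hy
          simp only [pvRunStep, e2, pvPStep])]
    rw [← List.foldl_map]
    simp only [List.map_cons, List.foldl_cons]
    have h0 : pvPStep [] (pvFirstField x) = [pvFirstField x] := by
      simp [pvPStep]
    rw [h0, pvRunLen (rest.map pvFirstField) [pvFirstField x] (pvFirstField x) (by simp)]
    simp
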